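-- pv_equiv track=rewrite | github.com/hertz-ai/HARTOS | security/key_delegation.py | _is_trusted_domain
-- ===== SOURCE A (Python) =====
-- _TRUSTED_DOMAINS = ('hevolve.ai', 'hertzai.com')
--
-- def _is_trusted_domain(fqdn: str) -> bool:
--     """Check if an FQDN belongs to a trusted Hevolve infrastructure domain.
--
--     Matches if the FQDN ends with any entry in _TRUSTED_DOMAINS.
--     For example, 'regional-us.hevolve.ai' matches 'hevolve.ai'.
--
--     Rejects empty strings, bare names without dots, and domains that
--     merely contain the suffix (e.g. 'malicioushevolve.ai').
--     """
--     if not fqdn or '.' not in fqdn: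
--         return False
--     for domain in _TRUSTED_DOMAINS:
--         if fqdn == domain:
--             return True
--         if fqdn.endswith('.' + domain):
--             return True
--     return False
-- ===== SOURCE B (Python) =====
-- _TRUSTED_DOMAINS = ('hevolve.ai', 'hertzai.com')
--
--
-- def _build_trie():
--     """Trie over the REVERSED trusted domains, stored as a node array:
--     nodes[k] = (accept, {char: child_index}); node 0 is the root."""
--     nodes = [(False, {})]
--     for dom in _TRUSTED_DOMAINS:
--         cur = 0
--         for ch in reversed(dom):
--             kids = nodes[cur][1]
--             if ch in kids:
--                 cur = kids[ch]
--             else: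
--                 nxt = len(nodes)
--                 nodes[cur] = (nodes[cur][0], dict(kids, **{ch: nxt}))
--                 nodes.append((False, {}))
--                 cur = nxt
--         nodes[cur] = (True, nodes[cur][1])
--     return nodes
--
--
-- _TRIE = _build_trie()
--
--
-- def _is_trusted_domain(fqdn: str) -> bool:
--     """Single right-to-left scan of the FQDN through the trie of reversed
--     trusted domains; accept only at a label boundary (start or a '.')."""
--     cur = 0
--     i = len(fqdn) - 1
--     while True:
--         accept, kids = _TRIE[cur]
--         if accept and (i < 0 or fqdn[i] == '.'):
--             return True
--         if i < 0 or fqdn[i] not in kids: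
--             return False
--         cur = kids[fqdn[i]]
--         i -= 1
-- ===== Notes on version B (the rewrite author's own statement) =====
-- stated objective: alternative
-- what changed: B builds a trie of the reversed trusted domains once and decides membership by a single right-to-left character scan of the FQDN through that trie, accepting only at a label boundary, instead of A's loop over the domains doing equality/endswith tests (A's empty/dotless guard is provably redundant).
import Mathlib
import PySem

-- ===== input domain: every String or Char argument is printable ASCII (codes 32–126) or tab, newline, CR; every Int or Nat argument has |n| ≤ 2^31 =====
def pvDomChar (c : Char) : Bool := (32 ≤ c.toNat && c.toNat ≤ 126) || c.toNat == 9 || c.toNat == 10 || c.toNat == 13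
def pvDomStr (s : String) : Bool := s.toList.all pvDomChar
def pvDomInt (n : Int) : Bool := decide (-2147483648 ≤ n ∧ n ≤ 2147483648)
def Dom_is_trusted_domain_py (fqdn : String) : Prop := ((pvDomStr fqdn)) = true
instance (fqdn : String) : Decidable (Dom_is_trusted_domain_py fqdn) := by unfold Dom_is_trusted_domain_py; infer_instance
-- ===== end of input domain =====

-- B replaces A's per-domain equality/endswith loop by one right-to-left scan of the FQDN
-- through a trie of the reversed trusted domains (objective: alternative).

def pvTrustedDomains : List (List Char) := ["hevolve.ai".toList, "hertzai.com".toList]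

-- ===== PORT A =====
-- the 'for domain in _TRUSTED_DOMAINS' loop with its two early returns
def pvLoopA (fqdn : List Char) : List (List Char) → Bool
  | [] => false
  | d :: rest =>
    if fqdn = d then true
    else if PySem.Chars.endswith fqdn ('.' :: d) then true
    else pvLoopA fqdn rest

def is_trusted_domain_py (fqdn : String) : Bool :=
  if fqdn.toList = [] ∨ PySem.Chars.isIn ['.'] fqdn.toList = false then false
  else pvLoopA fqdn.toList pvTrustedDomains

-- ===== PORT B =====
-- a trie node: (accept flag, children dict char → node index)
def pvDfl : Bool × PySem.Dict Char Int := (false, PySem.Dict.empty)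

-- inner 'for ch in reversed(dom)' loop of _build_trie (state: node array, current index)
def pvBuildStep (p : List (Bool × PySem.Dict Char Int) × Int) (ch : Char) :
    List (Bool × PySem.Dict Char Int) × Int :=
  let nodes := p.1
  let cur := p.2
  let node := PySem.List.pyGetD nodes cur pvDfl   -- cur is always a valid index
  match PySem.Dict.get? node.2 ch with
  | some k => (nodes, k)
  | none =>
    let nxt := PySem.List.len nodes
    let nodes := PySem.List.pySetD nodes cur (node.1, node.2.insert ch nxt)
    (nodes ++ [(false, PySem.Dict.empty)], nxt)

-- body of the 'for dom in _TRUSTED_DOMAINS' loop of _build_trie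
def pvBuildDom (nodes : List (Bool × PySem.Dict Char Int)) (dom : List Char) :
    List (Bool × PySem.Dict Char Int) :=
  let r := dom.reverse.foldl pvBuildStep (nodes, 0)
  let node := PySem.List.pyGetD r.1 r.2 pvDfl
  PySem.List.pySetD r.1 r.2 (true, node.2)

def pvTrie : List (Bool × PySem.Dict Char Int) :=
  pvTrustedDomains.foldl pvBuildDom [(false, PySem.Dict.empty)]

-- the 'while True' scan of _is_trusted_domain; the countdown index i over fqdn
-- is ported exactly as structural recursion over the reversed character list
def pvGo (trie : List (Bool × PySem.Dict Char Int)) (cur : Int) : List Char → Bool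
  | [] =>
    -- i < 0: 'accept and True' → return accept; otherwise 'i < 0' → return False
    (PySem.List.pyGetD trie cur pvDfl).1
  | c :: rest =>
    let node := PySem.List.pyGetD trie cur pvDfl
    if node.1 && (c == '.') then true
    else
      match PySem.Dict.get? node.2 c with
      | none => false
      | some n => pvGo trie n rest

def is_trusted_domain_py_alt (fqdn : String) : Bool :=
  pvGo pvTrie 0 fqdn.toList.reverse

-- ===== PRECONDITION & SPEC =====
def Spec_is_trusted_domain_py (fqdn : String) (out : Bool) : Prop := out = is_trusted_domain_py_alt fqdn
instance (fqdn : String) (out : Bool) : Decidable (Spec_is_trusted_domain_py fqdn out) := by unfold Spec_is_trusted_domain_py; infer_instance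

-- ===== CLAIM (what is proved, stated in full; the proofs are below) =====
def Claim_equal_is_trusted_domain_py : Prop := ∀ (fqdn : String), Dom_is_trusted_domain_py fqdn → Spec_is_trusted_domain_py fqdn (is_trusted_domain_py fqdn)

-- ===== LEMMAS AND PROOFS =====

-- boundary test: after consuming n chars, the scan is at the string start or at a '.'
def pvBnd (n : Nat) (l : List Char) : Bool :=
  match l.drop n with
  | [] => true
  | c :: _ => c == '.'

-- 'trie encodes, from index node, a non-branching chain spelling w, accepting at its end'
def pvIsChainB (trie : List (Bool × PySem.Dict Char Int)) : Int → List Char → Bool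
  | node, [] => decide (PySem.List.pyGetD trie node pvDfl = (true, PySem.Dict.empty))
  | node, c :: w =>
    decide (PySem.List.pyGetD trie node pvDfl = (false, PySem.Dict.empty.insert c (node + 1)))
      && pvIsChainB trie (node + 1) w

theorem go_chain (trie : List (Bool × PySem.Dict Char Int)) (w : List Char) :
    ∀ (node : Int) (l : List Char), pvIsChainB trie node w = true →
      pvGo trie node l = (List.isPrefixOf w l && pvBnd w.length l) := by
  induction w with
  | nil =>
    intro node l h
    simp only [pvIsChainB, decide_eq_true_eq] at h
    cases l with
    | nil => simp [pvGo, h, pvBnd]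
    | cons c rest =>
      simp only [pvGo, h, pvBnd, List.isPrefixOf, Bool.true_and]
      by_cases hc : c = '.'
      · simp [hc]
      · simp [hc, PySem.Dict.get?_empty]
  | cons a w' ih =>
    intro node l h
    simp only [pvIsChainB, Bool.and_eq_true, decide_eq_true_eq] at h
    obtain ⟨h1, h2⟩ := h
    cases l with
    | nil => simp [pvGo, h1, List.isPrefixOf]
    | cons c rest =>
      simp only [pvGo, h1, Bool.false_and, Bool.false_eq_true, if_neg, not_false_iff]
      rw [PySem.Dict.get?_insert]
      by_cases hc : c = a
      · subst hc
        simp only [if_true]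
        rw [ih _ _ h2]
        simp [List.isPrefixOf, pvBnd]
      · simp [if_neg hc, PySem.Dict.get?_empty, List.isPrefixOf, BEq.symm_false (beq_false_of_ne hc)]

set_option maxRecDepth 8192 in
theorem root_node :
    PySem.List.pyGetD pvTrie 0 pvDfl
      = (false, (PySem.Dict.empty.insert 'i' 1).insert 'm' 11) := by decide

set_option maxRecDepth 8192 in
theorem chain1 : pvIsChainB pvTrie 1 "a.evloveh".toList = true := by decide
set_option maxRecDepth 8192 in
theorem chain2 : pvIsChainB pvTrie 11 "oc.iaztreh".toList = true := by decide

theorem go_root (l : List Char) :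
    pvGo pvTrie 0 l
      = ((List.isPrefixOf "ia.evloveh".toList l && pvBnd 10 l)
          || (List.isPrefixOf "moc.iaztreh".toList l && pvBnd 11 l)) := by
  cases l with
  | nil => simp [pvGo, root_node]
  | cons c rest =>
    simp only [pvGo, root_node, Bool.false_and, Bool.false_eq_true, if_neg, not_false_iff]
    rw [PySem.Dict.get?_insert]
    by_cases hm : c = 'm'
    · subst hm
      simp only [if_true]
      rw [go_chain _ _ _ _ chain2]
      simp [List.isPrefixOf, pvBnd]
    · rw [if_neg hm, PySem.Dict.get?_insert]
      by_cases hi : c = 'i'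
      · subst hi
        simp only [if_true]
        rw [go_chain _ _ _ _ chain1]
        simp [List.isPrefixOf, pvBnd]
      · rw [if_neg hi]
        simp [PySem.Dict.get?_empty, List.isPrefixOf,
          BEq.symm_false (beq_false_of_ne hi), BEq.symm_false (beq_false_of_ne hm)]

-- prefix-of-the-reverse with the boundary bit ↔ 'equal or preceded by a dot' on the string itself
theorem rev_suffix (D cs : List Char) (hD : D ≠ []) :
    (List.isPrefixOf D.reverse cs.reverse && pvBnd D.length cs.reverse) = true
      ↔ (cs = D ∨ ('.' :: D) <:+ cs) := by
  rw [Bool.and_eq_true, List.isPrefixOf_iff_prefix, List.reverse_prefix]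
  constructor
  · rintro ⟨⟨u, rfl⟩, hb⟩
    have hdrop : (u ++ D).reverse.drop D.length = u.reverse := by
      simp [List.reverse_append, List.drop_left']
    rw [pvBnd, hdrop] at hb
    cases hu : u.reverse with
    | nil => left; simp [List.reverse_eq_nil_iff.mp hu]
    | cons x t =>
      right
      rw [hu] at hb
      simp only [beq_iff_eq] at hb
      subst hb
      have : u = t.reverse ++ ['.'] := by
        have := congrArg List.reverse hu; simpa using this
      exact ⟨t.reverse, by rw [this]; simp⟩
  · rintro (rfl | ⟨u, rfl⟩)
    · refine ⟨List.suffix_refl _, ?_⟩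
      have h0 : List.drop cs.length cs.reverse = [] := by simp
      simp [pvBnd, h0]
    · exact ⟨⟨u ++ ['.'], by simp⟩, by simp [pvBnd]⟩

theorem alt_iff (cs : List Char) :
    pvGo pvTrie 0 cs.reverse = true ↔
      (cs = "hevolve.ai".toList ∨ ('.' :: "hevolve.ai".toList) <:+ cs) ∨
      (cs = "hertzai.com".toList ∨ ('.' :: "hertzai.com".toList) <:+ cs) := by
  rw [go_root, Bool.or_eq_true]
  have e1 : "ia.evloveh".toList = "hevolve.ai".toList.reverse := by decide
  have e2 : "moc.iaztreh".toList = "hertzai.com".toList.reverse := by decide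
  rw [e1, e2,
    show (10 : Nat) = "hevolve.ai".toList.length from by decide,
    show (11 : Nat) = "hertzai.com".toList.length from by decide,
    rev_suffix _ cs (by decide), rev_suffix _ cs (by decide)]

theorem loopA_iff (cs : List Char) :
    pvLoopA cs pvTrustedDomains = true ↔
      (cs = "hevolve.ai".toList ∨ ('.' :: "hevolve.ai".toList) <:+ cs) ∨
      (cs = "hertzai.com".toList ∨ ('.' :: "hertzai.com".toList) <:+ cs) := by
  simp only [pvTrustedDomains, pvLoopA]
  split_ifs with h1 h2 h3 h4 <;>
    simp_all [PySem.Chars.endswith_iff]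

theorem isIn_dot (cs : List Char) : PySem.Chars.isIn ['.'] cs = true ↔ '.' ∈ cs := by
  rw [PySem.Chars.isIn_iff_infix]
  constructor
  · intro h; exact List.singleton_sublist.mp h.sublist
  · intro h
    obtain ⟨s, t, rfl⟩ := List.append_of_mem h
    exact ⟨s, t, by simp⟩

theorem main_eq (cs : List Char) :
    (if cs = [] ∨ PySem.Chars.isIn ['.'] cs = false then false else pvLoopA cs pvTrustedDomains)
      = pvGo pvTrie 0 cs.reverse := by
  have hB := alt_iff cs
  have hdot : pvGo pvTrie 0 cs.reverse = true → '.' ∈ cs ∧ cs ≠ [] := by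
    intro h
    rw [hB] at h
    constructor
    · rcases h with (rfl | ⟨u, hu⟩) | (rfl | ⟨u, hu⟩)
      · decide
      · rw [← hu]; simp
      · decide
      · rw [← hu]; simp
    · rcases h with (rfl | ⟨u, hu⟩) | (rfl | ⟨u, hu⟩) <;> simp_all <;> intro e <;> simp [e] at hu
  split_ifs with hg
  · cases hb : pvGo pvTrie 0 cs.reverse
    · rfl
    · obtain ⟨hmem, hne⟩ := hdot hb
      rcases hg with rfl | hno
      · exact absurd rfl hne
      · rw [(isIn_dot cs).mpr hmem] at hno; simp at hno
  · rw [Bool.eq_iff_iff, loopA_iff, hB]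

-- ===== VERDICT (by name: the statement is the Claim_ definition above) =====
theorem is_trusted_domain_py_spec : Claim_equal_is_trusted_domain_py := by
  intro fqdn _
  show is_trusted_domain_py fqdn = is_trusted_domain_py_alt fqdn
  simpa [is_trusted_domain_py, is_trusted_domain_py_alt] using main_eq fqdn.toList
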